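-- pv_equiv track=rewrite | github.com/Wetrain/daily_programmer | sentiment_analysis.py | negative_sentiment
-- ===== SOURCE A (Python) =====
-- def negative_sentiment(comments):
--     count = 0
--     negative_words = ['hate','hated','dislike','disliked','awful','terrible','bad','painful','worst', 'suck', 'rubbish', 'sad', 'sodding']
--     for comment in comments:
--         if comment == None:
--             continue
--         else:
--             for word in comment.split(' '):
--                 if word in negative_words:
--                     count += 1
--     return count
-- ===== SOURCE B (Python) =====
-- def negative_sentiment(comments):
--     negative_words = ['hate','hated','dislike','disliked','awful','terrible','bad','painful','worst', 'suck', 'rubbish', 'sad', 'sodding']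
--     words = [w for c in comments if c != None for w in c.split(' ')]
--     return sum(words.count(w) for w in negative_words)
-- ===== Notes on version B (the rewrite author's own statement) =====
-- stated objective: alternative
-- what changed: B first flattens all non-None comments into one word list (no counter, no membership test per word), then returns the sum over the 13 negative words of that word's count in the flat list; correct because the 13 targets are pairwise distinct.
import Mathlib
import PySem

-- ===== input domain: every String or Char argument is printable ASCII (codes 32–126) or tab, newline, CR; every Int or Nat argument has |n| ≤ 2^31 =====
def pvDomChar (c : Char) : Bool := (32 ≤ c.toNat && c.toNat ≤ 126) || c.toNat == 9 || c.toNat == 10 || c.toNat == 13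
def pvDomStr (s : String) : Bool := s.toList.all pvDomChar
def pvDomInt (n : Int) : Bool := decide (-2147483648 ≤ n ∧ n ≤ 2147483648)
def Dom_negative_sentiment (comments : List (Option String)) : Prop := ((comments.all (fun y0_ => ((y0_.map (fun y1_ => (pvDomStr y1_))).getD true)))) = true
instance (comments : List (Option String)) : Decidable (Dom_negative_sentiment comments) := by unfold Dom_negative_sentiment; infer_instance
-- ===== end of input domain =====

-- B flattens all words of the non-None comments into one list, then sums each negative word's count in it (alternative decomposition, not claimed faster).

-- the fixed 13-word list (shared literal constant of both programs)
def negativeWords : List String :=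
  ["hate","hated","dislike","disliked","awful","terrible","bad","painful","worst","suck","rubbish","sad","sodding"]

-- ===== PORT A =====
def negative_sentiment (comments : List (Option String)) : Int :=
  comments.foldl (fun count comment =>
    match comment with
    | none => count
    | some c =>
        ((PySem.Str.split? c " ").getD []).foldl
          (fun count word => if word ∈ negativeWords then count + 1 else count) count) 0

-- ===== PORT B =====
def negative_sentiment_alt (comments : List (Option String)) : Int :=
  let words : List String :=
    comments.flatMap (fun c =>
      match c with
      | none => []
      | some s => (PySem.Str.split? s " ").getD [])
  (negativeWords.map (fun w => (words.count w : Int))).sum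

-- ===== PRECONDITION & SPEC =====
def Spec_negative_sentiment (comments : List (Option String)) (out : Int) : Prop := out = negative_sentiment_alt comments
instance (comments : List (Option String)) (out : Int) : Decidable (Spec_negative_sentiment comments out) := by unfold Spec_negative_sentiment; infer_instance

-- ===== CLAIM =====
def Claim_equal_negative_sentiment : Prop := ∀ (comments : List (Option String)), Dom_negative_sentiment comments → Spec_negative_sentiment comments (negative_sentiment comments)

-- ===== LEMMAS AND PROOFS =====

-- all words of the non-None comments, in order (B's flat list)
def allWords (comments : List (Option String)) : List String :=
  comments.flatMap (fun c => match c with | none => [] | some s => (PySem.Str.split? s " ").getD [])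

-- A's inner loop counts the words of ws lying in negativeWords
lemma innerA (ws : List String) (k : Int) :
    ws.foldl (fun count word => if word ∈ negativeWords then count + 1 else count) k
      = k + (ws.countP (fun w => decide (w ∈ negativeWords)) : Int) := by
  induction ws generalizing k with
  | nil => simp
  | cons w ws ih =>
      simp only [List.foldl_cons, List.countP_cons, ih]
      by_cases h : w ∈ negativeWords
      · simp [h]; omega
      · simp [h]

-- A equals the membership count over allWords
lemma A_eq (comments : List (Option String)) (k : Int) :
    comments.foldl (fun count comment =>
      match comment with
      | none => count
      | some c =>
          ((PySem.Str.split? c " ").getD []).foldl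
            (fun count word => if word ∈ negativeWords then count + 1 else count) count) k
      = k + ((allWords comments).countP (fun w => decide (w ∈ negativeWords)) : Int) := by
  induction comments generalizing k with
  | nil => simp [allWords]
  | cons c cs ih =>
      simp only [List.foldl_cons]
      rw [ih]
      cases c with
      | none => simp [allWords, List.flatMap_cons]
      | some s =>
          simp only [innerA, allWords, List.flatMap_cons, List.countP_append]
          push_cast
          ring

-- countP for membership in w :: L splits off count w when w ∉ L
lemma countP_mem_cons (w : String) (L : List String) (hw : w ∉ L) (xs : List String) :
    xs.countP (fun x => decide (x ∈ w :: L)) = xs.count w + xs.countP (fun x => decide (x ∈ L)) := by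
  induction xs with
  | nil => simp
  | cons x xs ihx =>
      rw [List.countP_cons, List.countP_cons, List.count_cons, ihx]
      by_cases hx : x = w
      · subst hx; simp [hw]; omega
      · by_cases hx2 : x ∈ L
        · simp [hx, hx2]; omega
        · simp [hx, hx2]

-- summing per-word counts over a duplicate-free list equals one membership count
lemma sum_counts (L : List String) (hL : L.Nodup) (xs : List String) :
    (L.map (fun w => (xs.count w : Int))).sum
      = (xs.countP (fun x => decide (x ∈ L)) : Int) := by
  induction L with
  | nil => simp
  | cons w L ih =>
      have hw : w ∉ L := (List.nodup_cons.mp hL).1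
      rw [List.map_cons, List.sum_cons, ih (List.nodup_cons.mp hL).2,
        countP_mem_cons w L hw xs]
      push_cast
      ring

lemma negativeWords_nodup : negativeWords.Nodup := by decide

-- ===== VERDICT =====
theorem negative_sentiment_spec : Claim_equal_negative_sentiment := by
  intro comments _
  unfold Spec_negative_sentiment negative_sentiment negative_sentiment_alt
  rw [A_eq]
  rw [show (comments.flatMap (fun c =>
      match c with
      | none => []
      | some s => (PySem.Str.split? s " ").getD [])) = allWords comments from rfl]
  rw [sum_counts negativeWords negativeWords_nodup]
  ring
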